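-- pv_equiv track=rewrite | github.com/andrewbakasa/investmentproject | investments_appraisal/base_report.py | _accumulate_previous
-- ===== SOURCE A (Python) =====
-- def _accumulate_previous(list_):
--     next_value =0
--     for i in range(len(list_)):
--         if i>0:
--             next_value= list_[i-1]
--         else:
--             next_value =0
--         yield next_value
-- ===== SOURCE B (Python) =====
-- def _accumulate_previous(list_):
--     yield from ([0] + list(list_))[:-1]
-- ===== Notes on version B (the rewrite author's own statement) =====
-- stated objective: idiomatic
-- what changed: Replaces the per-element index loop (range(len()) with an i>0 branch and list_[i-1] lookup) by a whole-list construction: prepend 0, slice off the last element, and yield from that list in one shot.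
import Mathlib
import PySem

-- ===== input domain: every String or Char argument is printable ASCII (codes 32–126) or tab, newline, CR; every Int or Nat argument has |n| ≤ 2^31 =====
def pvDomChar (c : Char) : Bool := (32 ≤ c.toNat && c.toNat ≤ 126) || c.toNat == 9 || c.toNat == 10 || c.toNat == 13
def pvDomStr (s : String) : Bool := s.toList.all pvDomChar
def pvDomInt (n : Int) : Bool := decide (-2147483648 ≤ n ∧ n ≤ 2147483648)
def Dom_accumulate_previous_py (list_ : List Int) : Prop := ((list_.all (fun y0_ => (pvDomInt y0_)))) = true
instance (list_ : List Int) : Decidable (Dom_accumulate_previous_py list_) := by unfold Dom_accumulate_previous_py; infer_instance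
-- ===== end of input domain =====

-- B replaces the per-element index loop by a whole-list construction ([0]+list_)[:-1]; same cost, more idiomatic.
-- ===== PORT A =====
-- yields: for i in range(len(list_)), next_value = list_[i-1] if i>0 else 0
def accumulate_previous_py (list_ : List Int) : List Int :=
  (PySem.List.pyRange 0 (list_.length : Int) 1).foldl
    (fun acc i =>
      acc ++ [if i > 0 then (PySem.List.pyGet? list_ (i - 1)).getD 0 else 0])
    []

-- ===== PORT B =====
-- B: yield from ([0] + list(list_))[:-1]
def accumulate_previous_py_alt (list_ : List Int) : List Int :=
  PySem.List.slice (0 :: list_) none (some (-1))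

-- ===== PRECONDITION & SPEC =====
def Spec_accumulate_previous_py (list_ : List Int) (out : List Int) : Prop := out = accumulate_previous_py_alt list_
instance (list_ : List Int) (out : List Int) : Decidable (Spec_accumulate_previous_py list_ out) := by unfold Spec_accumulate_previous_py; infer_instance

-- ===== CLAIM (what is proved, stated in full; the proofs are below) =====
def Claim_equal_accumulate_previous_py : Prop := ∀ (list_ : List Int), Dom_accumulate_previous_py list_ → Spec_accumulate_previous_py list_ (accumulate_previous_py list_)

-- ===== LEMMAS AND PROOFS =====

theorem mapRange_eq_dropLast (xs : List Int) :
    (List.range xs.length).map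
        (fun (k : Nat) => if (0:Int) < (k : Int) then (PySem.List.pyGet? xs ((k : Int) - 1)).getD 0 else 0)
      = (0 :: xs).dropLast := by
  cases hxs : xs with
  | nil => simp
  | cons x t =>
    apply List.ext_getElem
    · simp
    · intro i h1 h2
      simp only [List.getElem_map, List.getElem_range]
      by_cases hi : i = 0
      · subst hi; simp
      · have h0 : (0:Int) < (i:Int) := by omega
        rw [if_pos h0]
        have hc : ((i : Int) - 1) = ((i - 1 : Nat) : Int) := by omega
        rw [hc, PySem.List.pyGet?_natCast]
        have hlt : i - 1 < (x :: t).length := by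
          simp at h1 ⊢; omega
        rw [List.getElem?_eq_getElem hlt]
        simp only [Option.getD_some]
        rcases i with _ | j
        · omega
        · simp only [Nat.add_sub_cancel]
          rw [List.getElem_dropLast]
          simp

-- ===== VERDICT (by name: the statement is the Claim_ definition above) =====
theorem accumulate_previous_py_spec : Claim_equal_accumulate_previous_py := by
  intro list_ _
  unfold Spec_accumulate_previous_py accumulate_previous_py accumulate_previous_py_alt
  rw [PySem.List.foldl_append_singleton_eq_map, PySem.List.pyRange_one, List.map_map,
      PySem.List.slice_to_neg_one]
  have hn : ((list_.length : Int) - 0).toNat = list_.length := by omega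
  rw [hn]
  simpa [Function.comp_def] using mapRange_eq_dropLast list_
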